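-- pv_equiv track=rewrite | github.com/TakaIshikawa/blueprint | src/blueprint/plan_dependency_sla_matrix.py | _coordination_risk
-- ===== SOURCE A (Python) =====
-- from typing import Any, Iterable, Literal, Mapping, TypeVar
--
-- CoordinationRisk = Literal["low", "medium", "high"]
--
-- def _coordination_risk(reasons: list[str]) -> CoordinationRisk:
--     if any(
--         reason in reasons
--         for reason in (
--             "unknown prerequisite",
--             "cross-engine boundary",
--             "high task risk",
--             "high complexity",
--         )
--     ):
--         return "high"
--     if "cross-owner boundary" in reasons or "cross-milestone handoff" in reasons:
--         return "medium"
--     return "low"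
-- ===== SOURCE B (Python) =====
-- _RANK = {
--     "unknown prerequisite": 2,
--     "cross-engine boundary": 2,
--     "high task risk": 2,
--     "high complexity": 2,
--     "cross-owner boundary": 1,
--     "cross-milestone handoff": 1,
-- }
--
--
-- def _coordination_risk(reasons: list[str]) -> str:
--     rank = 0
--     for reason in reasons:
--         rank = max(rank, _RANK.get(reason, 0))
--     return "high" if rank == 2 else "medium" if rank == 1 else "low"
-- ===== Notes on version B (the rewrite author's own statement) =====
-- stated objective: alternative
-- what changed: Replaces the two any()/membership tests over the fixed keyword tuples with a single fold over the input list that keeps a running maximum severity rank looked up in a dict, mapped back to low/medium/high at the end.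
import Mathlib
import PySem

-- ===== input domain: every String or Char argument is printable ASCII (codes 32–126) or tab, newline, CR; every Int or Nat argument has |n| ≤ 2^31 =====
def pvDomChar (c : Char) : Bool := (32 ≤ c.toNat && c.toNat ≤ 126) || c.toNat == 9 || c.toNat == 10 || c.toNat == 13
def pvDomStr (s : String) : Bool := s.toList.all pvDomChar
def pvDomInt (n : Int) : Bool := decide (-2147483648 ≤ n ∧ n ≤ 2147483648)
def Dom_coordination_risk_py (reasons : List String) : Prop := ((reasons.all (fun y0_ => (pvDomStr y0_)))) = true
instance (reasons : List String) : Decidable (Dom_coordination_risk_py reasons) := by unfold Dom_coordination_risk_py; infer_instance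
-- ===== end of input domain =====

-- B replaces A's fixed-keyword membership tests by one fold over the input keeping a
-- running maximum severity rank from a dict (objective: alternative decomposition).

-- ===== PORT A =====
def coordination_risk_py (reasons : List String) : String :=
  if "unknown prerequisite" ∈ reasons ∨ "cross-engine boundary" ∈ reasons ∨
     "high task risk" ∈ reasons ∨ "high complexity" ∈ reasons then "high"
  else if "cross-owner boundary" ∈ reasons ∨ "cross-milestone handoff" ∈ reasons then "medium"
  else "low"

-- ===== PORT B =====
def pvRankDict : PySem.Dict String Int :=
  PySem.Dict.ofList
    [("unknown prerequisite", 2), ("cross-engine boundary", 2), ("high task risk", 2),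
     ("high complexity", 2), ("cross-owner boundary", 1), ("cross-milestone handoff", 1)]

def coordination_risk_py_alt (reasons : List String) : String :=
  let rank := reasons.foldl (fun m r => max m (pvRankDict.getD r 0)) 0
  if rank = 2 then "high" else if rank = 1 then "medium" else "low"

-- ===== PRECONDITION & SPEC =====
def Spec_coordination_risk_py (reasons : List String) (out : String) : Prop := out = coordination_risk_py_alt reasons
instance (reasons : List String) (out : String) : Decidable (Spec_coordination_risk_py reasons out) := by unfold Spec_coordination_risk_py; infer_instance

-- ===== CLAIM (what is proved, stated in full; the proofs are below) =====
def Claim_equal_coordination_risk_py : Prop := ∀ (reasons : List String), Dom_coordination_risk_py reasons → Spec_coordination_risk_py reasons (coordination_risk_py reasons)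

-- ===== LEMMAS AND PROOFS =====

-- the rank dict, characterised pointwise
lemma rank_spec (r : String) : pvRankDict.getD r 0 =
    if r = "unknown prerequisite" ∨ r = "cross-engine boundary" ∨
       r = "high task risk" ∨ r = "high complexity" then 2
    else if r = "cross-owner boundary" ∨ r = "cross-milestone handoff" then 1 else 0 := by
  split_ifs with h1 h2
  · rcases h1 with h | h | h | h <;> subst h <;> decide
  · rcases h2 with h | h <;> subst h <;> decide
  · push Not at h1 h2
    obtain ⟨n1, n2, n3, n4⟩ := h1
    obtain ⟨n5, n6⟩ := h2
    simp [pvRankDict, PySem.Dict.ofList, PySem.Dict.update, PySem.Dict.getD_insert,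
      PySem.Dict.getD_empty, n1, n2, n3, n4, n5, n6]

lemma foldl_max_le (f : String → Int) (l : List String) (a b : Int)
    (ha : a ≤ b) (h : ∀ x ∈ l, f x ≤ b) : l.foldl (fun m r => max m (f r)) a ≤ b := by
  induction l generalizing a with
  | nil => simpa using ha
  | cons x t ih =>
      simp only [List.foldl_cons]
      exact ih (max a (f x)) (max_le ha (h x (List.mem_cons_self)))
        (fun y hy => h y (List.mem_cons_of_mem _ hy))

-- ===== VERDICT (by name: the statement is the Claim_ definition above) =====
theorem coordination_risk_py_spec : Claim_equal_coordination_risk_py := by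
  intro reasons _
  unfold Spec_coordination_risk_py coordination_risk_py coordination_risk_py_alt
  have hb := PySem.List.le_foldl_max_int reasons (fun r => pvRankDict.getD r 0) 0
  by_cases hH : "unknown prerequisite" ∈ reasons ∨ "cross-engine boundary" ∈ reasons ∨
      "high task risk" ∈ reasons ∨ "high complexity" ∈ reasons
  · have h2 : (2 : Int) ≤ reasons.foldl (fun m r => max m (pvRankDict.getD r 0)) 0 := by
      rcases hH with h | h | h | h <;> simpa [rank_spec] using hb.2 _ h
    have hle : reasons.foldl (fun m r => max m (pvRankDict.getD r 0)) 0 ≤ 2 :=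
      foldl_max_le _ reasons 0 2 (by norm_num)
        (fun x _ => by simp only [rank_spec]; split_ifs <;> norm_num)
    simp [hH, le_antisymm hle h2]
  · by_cases hM : "cross-owner boundary" ∈ reasons ∨ "cross-milestone handoff" ∈ reasons
    · have h1 : (1 : Int) ≤ reasons.foldl (fun m r => max m (pvRankDict.getD r 0)) 0 := by
        rcases hM with h | h <;> simpa [rank_spec] using hb.2 _ h
      have hle : reasons.foldl (fun m r => max m (pvRankDict.getD r 0)) 0 ≤ 1 :=
        foldl_max_le _ reasons 0 1 (by norm_num)
          (fun x hx => by
            simp only [rank_spec]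
            split_ifs with hx2 hx1
            · exact (hH (by rcases hx2 with h | h | h | h <;> subst h <;> tauto)).elim
            · norm_num
            · norm_num)
      simp [hH, hM, le_antisymm hle h1]
    · have hle : reasons.foldl (fun m r => max m (pvRankDict.getD r 0)) 0 ≤ 0 :=
        foldl_max_le _ reasons 0 0 le_rfl
          (fun x hx => by
            simp only [rank_spec]
            split_ifs with hx2 hx1
            · exact (hH (by rcases hx2 with h | h | h | h <;> subst h <;> tauto)).elim
            · exact (hM (by rcases hx1 with h | h <;> subst h <;> tauto)).elim
            · norm_num)
      simp [hH, hM, le_antisymm hle hb.1]
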